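-- pv_equiv track=rewrite | github.com/2233admin/glyph-arts | cli_charts/dashboard.py | build_layout
-- ===== SOURCE A (Python) =====
-- def build_layout(panels: list) -> list:
--     """Group panels into rows.
--     Respects panel["row"] for manual placement; otherwise auto-grid.
--     <=4 panels -> 2 columns. >4 panels -> 3 columns.
--     """
--     if any("row" in p for p in panels):
--         from collections import defaultdict
--         rows_map: dict = defaultdict(list)
--         auto_row = max((p.get("row", 0) for p in panels), default=0) + 1
--         for p in panels:
--             if "row" in p:
--                 rows_map[p["row"]].append(p)
--             else:
--                 rows_map[auto_row].append(p)
--                 auto_row += 1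
--         return [rows_map[k] for k in sorted(rows_map)]
--     cols = 2 if len(panels) <= 4 else 3
--     return [panels[i: i + cols] for i in range(0, len(panels), cols)]
-- ===== SOURCE B (Python) =====
-- def build_layout(panels: list) -> list:
--     """Group panels into rows: flat (row_key, panel) records + sorted distinct keys,
--     instead of a defaultdict accumulation."""
--     if not any("row" in p for p in panels):
--         cols = 2 if len(panels) <= 4 else 3
--         return [panels[i: i + cols] for i in range(0, len(panels), cols)]
--     auto = max((p.get("row", 0) for p in panels), default=0) + 1
--     records = []
--     for p in panels:
--         if "row" in p:
--             records.append((p["row"], p))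
--         else:
--             records.append((auto, p))
--             auto += 1
--     keys = sorted({k for k, _ in records})
--     return [[p for k2, p in records if k2 == k] for k in keys]
-- ===== Notes on version B (the rewrite author's own statement) =====
-- stated objective: alternative
-- what changed: The manual-placement branch no longer accumulates a defaultdict: one pass builds flat (row_key, panel) records, then the sorted distinct keys are emitted with a per-key filter that preserves record order; the auto-grid branch is unchanged.
import Mathlib
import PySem

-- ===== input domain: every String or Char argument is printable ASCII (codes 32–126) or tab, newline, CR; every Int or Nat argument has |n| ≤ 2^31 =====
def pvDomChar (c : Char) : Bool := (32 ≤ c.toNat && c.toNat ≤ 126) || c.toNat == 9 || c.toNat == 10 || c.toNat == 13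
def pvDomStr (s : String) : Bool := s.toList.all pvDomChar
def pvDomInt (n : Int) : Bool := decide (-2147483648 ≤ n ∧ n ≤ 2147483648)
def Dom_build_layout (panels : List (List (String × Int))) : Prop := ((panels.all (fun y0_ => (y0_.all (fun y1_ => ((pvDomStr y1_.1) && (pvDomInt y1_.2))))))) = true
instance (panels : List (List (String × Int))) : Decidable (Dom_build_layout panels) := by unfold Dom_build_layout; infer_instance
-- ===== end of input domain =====

-- B replaces A's defaultdict accumulation (manual branch) by a flat (row_key, panel) record list,
-- sorted distinct keys and a per-key filter; the auto-grid branch is unchanged. Objective: alternative.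

-- ===== PORT A =====
def build_layout (panels : List (List (String × Int))) : List (List (List (String × Int))) :=
  if panels.any (fun p => (PySem.Dict.mk p).contains "row") then
    -- auto_row = max((p.get("row", 0) for p in panels), default=0) + 1
    let auto_row0 : Int := PySem.List.maxD (panels.map (fun p => (PySem.Dict.mk p).getD "row" 0)) (fun x => x) 0 + 1
    -- for p in panels: append p to rows_map[p["row"]] or rows_map[auto_row] (then auto_row += 1)
    let st := panels.foldl
      (fun (s : PySem.Dict Int (List (List (String × Int))) × Int) p =>
        match (PySem.Dict.mk p).get? "row" with
        | some r => (s.1.modify r [] (fun v => v ++ [p]), s.2)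
        | none => (s.1.modify s.2 [] (fun v => v ++ [p]), s.2 + 1))
      (PySem.Dict.empty, auto_row0)
    -- [rows_map[k] for k in sorted(rows_map)]
    (PySem.List.sorted st.1.keys (fun k => k) false).map (fun k => st.1.getD k [])
  else
    let cols : Int := if panels.length ≤ 4 then 2 else 3
    (PySem.List.pyRange 0 panels.length cols).map
      (fun i => PySem.List.slice panels (some i) (some (i + cols)))

-- ===== PORT B =====
def build_layout_alt (panels : List (List (String × Int))) : List (List (List (String × Int))) :=
  if !(panels.any (fun p => (PySem.Dict.mk p).contains "row")) then
    let cols : Int := if panels.length ≤ 4 then 2 else 3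
    (PySem.List.pyRange 0 panels.length cols).map
      (fun i => PySem.List.slice panels (some i) (some (i + cols)))
  else
    -- one pass building (key, panel) records with the incrementing auto key
    let st := panels.foldl
      (fun (s : Int × List (Int × List (String × Int))) p =>
        match (PySem.Dict.mk p).get? "row" with
        | some r => (s.1, s.2 ++ [(r, p)])
        | none => (s.1 + 1, s.2 ++ [(s.1, p)]))
      (PySem.List.maxD (panels.map (fun p => (PySem.Dict.mk p).getD "row" 0)) (fun x => x) 0 + 1, [])
    let records := st.2
    -- keys = sorted({k for k, _ in records}); one row per key, panels in record order
    (PySem.List.sorted (PySem.Set.ofList (records.map (fun t => t.1))) (fun k => k) false).map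
      (fun k => (records.filter (fun t => t.1 == k)).map (fun t => t.2))

-- ===== PRECONDITION & SPEC =====
def Spec_build_layout (panels : List (List (String × Int))) (out : List (List (List (String × Int)))) : Prop := out = build_layout_alt panels
instance (panels : List (List (String × Int))) (out : List (List (List (String × Int)))) : Decidable (Spec_build_layout panels out) := by unfold Spec_build_layout; infer_instance

-- ===== CLAIM (what is proved, stated in full; the proofs are below) =====
def Claim_equal_build_layout : Prop := ∀ (panels : List (List (String × Int))), Dom_build_layout panels → Spec_build_layout panels (build_layout panels)

-- ===== LEMMAS AND PROOFS =====

-- B's record list and final counter do not depend on the accumulator already collected.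
theorem pv_recs_accum (ps : List (List (String × Int))) (a : Int)
    (acc : List (Int × List (String × Int))) :
    ps.foldl
      (fun (s : Int × List (Int × List (String × Int))) p =>
        match (PySem.Dict.mk p).get? "row" with
        | some r => (s.1, s.2 ++ [(r, p)])
        | none => (s.1 + 1, s.2 ++ [(s.1, p)])) (a, acc)
    = ((ps.foldl
      (fun (s : Int × List (Int × List (String × Int))) p =>
        match (PySem.Dict.mk p).get? "row" with
        | some r => (s.1, s.2 ++ [(r, p)])
        | none => (s.1 + 1, s.2 ++ [(s.1, p)])) (a, [])).1,
      acc ++ (ps.foldl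
      (fun (s : Int × List (Int × List (String × Int))) p =>
        match (PySem.Dict.mk p).get? "row" with
        | some r => (s.1, s.2 ++ [(r, p)])
        | none => (s.1 + 1, s.2 ++ [(s.1, p)])) (a, [])).2) := by
  induction ps generalizing a acc with
  | nil => simp
  | cons p ps ih =>
    simp only [List.foldl_cons]
    cases h : (PySem.Dict.mk p).get? "row" with
    | some r =>
      simp only [List.nil_append]
      rw [ih a (acc ++ [(r, p)]), ih a [(r, p)]]
      simp
    | none =>
      simp only [List.nil_append]
      rw [ih (a + 1) (acc ++ [(a, p)]), ih (a + 1) [(a, p)]]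
      simp

-- A's dict-building loop is B's record pass followed by folding the records into the dict.
theorem pv_loop_eq (ps : List (List (String × Int))) (a : Int)
    (d : PySem.Dict Int (List (List (String × Int)))) :
    ps.foldl
      (fun (s : PySem.Dict Int (List (List (String × Int))) × Int) p =>
        match (PySem.Dict.mk p).get? "row" with
        | some r => (s.1.modify r [] (fun v => v ++ [p]), s.2)
        | none => (s.1.modify s.2 [] (fun v => v ++ [p]), s.2 + 1)) (d, a)
    = ((ps.foldl
      (fun (s : Int × List (Int × List (String × Int))) p =>
        match (PySem.Dict.mk p).get? "row" with
        | some r => (s.1, s.2 ++ [(r, p)])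
        | none => (s.1 + 1, s.2 ++ [(s.1, p)])) (a, [])).2.foldl
          (fun d p => d.modify p.1 [] (fun x => x ++ [p.2])) d,
      (ps.foldl
      (fun (s : Int × List (Int × List (String × Int))) p =>
        match (PySem.Dict.mk p).get? "row" with
        | some r => (s.1, s.2 ++ [(r, p)])
        | none => (s.1 + 1, s.2 ++ [(s.1, p)])) (a, [])).1) := by
  induction ps generalizing a d with
  | nil => simp
  | cons p ps ih =>
    simp only [List.foldl_cons]
    cases h : (PySem.Dict.mk p).get? "row" with
    | some r =>
      simp only [List.nil_append]
      rw [ih a (d.modify r [] (fun v => v ++ [p]))]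
      conv_rhs => rw [pv_recs_accum ps a [(r, p)]]
      simp
    | none =>
      simp only [List.nil_append]
      rw [ih (a + 1) (d.modify a [] (fun v => v ++ [p]))]
      conv_rhs => rw [pv_recs_accum ps (a + 1) [(a, p)]]
      simp

-- The grouping dict's keys are the distinct record keys in first-appearance order.
theorem pv_keys (l : List (Int × List (String × Int))) :
    (l.foldl (fun d p => d.modify p.1 [] (fun x => x ++ [p.2])) PySem.Dict.empty).keys
    = PySem.Set.ofList (l.map (fun t => t.1)) := by
  rw [PySem.Dict.keys_foldl_modify_key l (fun t : Int × List (String × Int) => t.1)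
    ([] : List (List (String × Int))) (fun _ p => (fun x => x ++ [p.2]))]
  rw [PySem.Dict.keys_empty, PySem.Set.update_nil_left]

-- ===== VERDICT (by name: the statement is the Claim_ definition above) =====
theorem build_layout_spec : Claim_equal_build_layout := by
  intro panels _
  unfold Spec_build_layout build_layout build_layout_alt
  cases hc : panels.any (fun p => (PySem.Dict.mk p).contains "row") with
  | false => simp
  | true =>
    simp only [Bool.not_true, if_true, Bool.false_eq_true, if_false]
    rw [pv_loop_eq]
    rw [pv_keys]
    apply List.map_congr_left
    intro k _
    rw [PySem.Dict.getD_foldl_modify_append]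
    simp
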